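-- pv_equiv track=rewrite | github.com/mamimia/ihouse-core | src/api/portfolio_dashboard_router.py | _occupancy_for_property
-- ===== SOURCE A (Python) =====
-- from typing import Any, Dict, List, Optional
--
-- def _occupancy_for_property(rows: List[dict], property_id: str, today: str) -> Dict[str, Any]:
--     prop_rows = [r for r in rows if r.get("property_id") == property_id]
--     arrivals   = sum(1 for r in prop_rows if str(r.get("check_in") or "")  == today)
--     departures = sum(1 for r in prop_rows if str(r.get("check_out") or "") == today)
--     return {
--         "active_bookings":   len(prop_rows),
--         "arrivals_today":    arrivals,
--         "departures_today":  departures,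
--         "cleanings_today":   departures,
--     }
-- ===== SOURCE B (Python) =====
-- def _occupancy_for_property(rows, property_id, today):
--     # Build a group-by index over ALL property ids in one pass, then look up the
--     # requested property: stats[key] = (active, arrivals, departures).
--     stats = {}
--     for r in rows:
--         key = r.get("property_id")
--         a, arr, dep = stats.get(key, (0, 0, 0))
--         stats[key] = (
--             a + 1,
--             arr + (str(r.get("check_in") or "") == today),
--             dep + (str(r.get("check_out") or "") == today),
--         )
--     a, arr, dep = stats.get(property_id, (0, 0, 0))
--     return {
--         "active_bookings": a,
--         "arrivals_today": arr,
--         "departures_today": dep,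
--         "cleanings_today": dep,
--     }
-- ===== Notes on version B (the rewrite author's own statement) =====
-- stated objective: alternative
-- what changed: Instead of filtering rows for the one property and scanning the filtered list twice, B builds a dictionary index grouping (active, arrivals, departures) triples per property id in a single pass and then looks up the requested property.
import Mathlib
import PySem

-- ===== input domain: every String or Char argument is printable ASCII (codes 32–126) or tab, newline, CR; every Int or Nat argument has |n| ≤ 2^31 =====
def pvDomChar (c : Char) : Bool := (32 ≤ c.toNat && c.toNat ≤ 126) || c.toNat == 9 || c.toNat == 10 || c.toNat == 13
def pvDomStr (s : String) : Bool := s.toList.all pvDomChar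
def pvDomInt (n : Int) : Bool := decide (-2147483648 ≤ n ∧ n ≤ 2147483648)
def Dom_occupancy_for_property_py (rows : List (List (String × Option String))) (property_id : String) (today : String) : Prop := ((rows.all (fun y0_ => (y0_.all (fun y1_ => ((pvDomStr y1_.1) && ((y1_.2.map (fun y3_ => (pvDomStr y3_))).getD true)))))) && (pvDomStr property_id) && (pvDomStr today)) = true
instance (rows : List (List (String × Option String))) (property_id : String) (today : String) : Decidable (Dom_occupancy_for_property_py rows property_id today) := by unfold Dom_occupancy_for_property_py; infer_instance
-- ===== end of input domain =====

-- B replaces A's filter-then-rescan scheme by a dictionary index grouping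
-- (active, arrivals, departures) per property id, looked up once at the end;
-- objective: alternative (a group-by index instead of per-property filtering).

-- Python r.get(k): first matching key's value, None if absent (a stored None and
-- a missing key both give none, exactly Python's r.get(k))
def pvRowGet (r : List (String × Option String)) (k : String) : Option String :=
  match r.find? (fun p => p.1 == k) with
  | some p => p.2
  | none => none

-- str(x or ""): None and "" are falsy → ""; otherwise the string itself
def pvCoerce (x : Option String) : String := x.getD ""

-- ===== PORT A =====
def occupancy_for_property_py (rows : List (List (String × Option String))) (property_id : String) (today : String) : List (String × Int) :=
  let prop_rows := rows.filter (fun r => pvRowGet r "property_id" == some property_id)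
  let arrivals : Int := ((prop_rows.filter (fun r => pvCoerce (pvRowGet r "check_in") == today)).length : Int)
  let departures : Int := ((prop_rows.filter (fun r => pvCoerce (pvRowGet r "check_out") == today)).length : Int)
  [("active_bookings", (prop_rows.length : Int)),
   ("arrivals_today", arrivals),
   ("departures_today", departures),
   ("cleanings_today", departures)]

-- ===== PORT B =====
def occupancy_for_property_py_alt (rows : List (List (String × Option String))) (property_id : String) (today : String) : List (String × Int) :=
  let stats : PySem.Dict (Option String) (Int × Int × Int) :=
    rows.foldl (fun d r =>
      let key := pvRowGet r "property_id"
      let t := d.getD key (0, 0, 0)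
      d.insert key
        (t.1 + 1,
         t.2.1 + (if pvCoerce (pvRowGet r "check_in") == today then 1 else 0),
         t.2.2 + (if pvCoerce (pvRowGet r "check_out") == today then 1 else 0)))
      PySem.Dict.empty
  let t := stats.getD (some property_id) (0, 0, 0)
  [("active_bookings", t.1),
   ("arrivals_today", t.2.1),
   ("departures_today", t.2.2),
   ("cleanings_today", t.2.2)]

-- ===== PRECONDITION & SPEC =====
def Spec_occupancy_for_property_py (rows : List (List (String × Option String))) (property_id : String) (today : String) (out : List (String × Int)) : Prop := out = occupancy_for_property_py_alt rows property_id today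
instance (rows : List (List (String × Option String))) (property_id : String) (today : String) (out : List (String × Int)) : Decidable (Spec_occupancy_for_property_py rows property_id today out) := by unfold Spec_occupancy_for_property_py; infer_instance

-- ===== CLAIM =====
def Claim_equal_occupancy_for_property_py : Prop := ∀ (rows : List (List (String × Option String))) (property_id : String) (today : String), Dom_occupancy_for_property_py rows property_id today → Spec_occupancy_for_property_py rows property_id today (occupancy_for_property_py rows property_id today)

-- ===== LEMMAS AND PROOFS =====

-- invariant of B's grouping fold: for every key k, the triple stored at k grows by
-- A's three counts over the rows whose property_id is k
theorem pv_group_inv (rows : List (List (String × Option String))) (today : String)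
    (d : PySem.Dict (Option String) (Int × Int × Int)) (k : Option String) :
    (rows.foldl (fun d r =>
      let key := pvRowGet r "property_id"
      let t := d.getD key (0, 0, 0)
      d.insert key
        (t.1 + 1,
         t.2.1 + (if pvCoerce (pvRowGet r "check_in") == today then 1 else 0),
         t.2.2 + (if pvCoerce (pvRowGet r "check_out") == today then 1 else 0))) d).getD k (0, 0, 0)
    = ((d.getD k (0, 0, 0)).1 + ((rows.filter (fun r => pvRowGet r "property_id" == k)).length : Int),
       (d.getD k (0, 0, 0)).2.1 + (((rows.filter (fun r => pvRowGet r "property_id" == k)).filter (fun r => pvCoerce (pvRowGet r "check_in") == today)).length : Int),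
       (d.getD k (0, 0, 0)).2.2 + (((rows.filter (fun r => pvRowGet r "property_id" == k)).filter (fun r => pvCoerce (pvRowGet r "check_out") == today)).length : Int)) := by
  induction rows generalizing d with
  | nil => simp
  | cons r rs ih =>
    simp only [List.foldl_cons]
    rw [ih]
    by_cases hk : k = pvRowGet r "property_id"
    · subst hk
      rw [PySem.Dict.getD_insert_self]
      by_cases hi : (pvCoerce (pvRowGet r "check_in") == today) = true <;>
        by_cases ho : (pvCoerce (pvRowGet r "check_out") == today) = true <;>
          simp [hi, ho, Prod.ext_iff] <;> omega
    · rw [PySem.Dict.getD_insert, if_neg hk]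
      have : (pvRowGet r "property_id" == k) = false := by
        simp; exact fun h => hk h.symm
      simp [this]

-- ===== VERDICT =====
theorem occupancy_for_property_py_spec : Claim_equal_occupancy_for_property_py := by
  intro rows property_id today _
  unfold Spec_occupancy_for_property_py occupancy_for_property_py occupancy_for_property_py_alt
  simp only [pv_group_inv, PySem.Dict.getD_empty]
  simp
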